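-- pv_equiv track=rewrite | github.com/SHADOWMMARK/MyAlgorithm | 1818. Minimum Absolute Sum Difference.py | LOCAEP
-- ===== SOURCE A (Python) =====
-- import bisect
--
-- def LOCAEP(nums):
--     reco = []
--     for i,x in enumerate(nums):
--         if not reco or reco[-1]<=x:
--             reco.append(x)
--             nums[i] = len(reco)
--         else:
--             idx = bisect.bisect(reco,x)
--             reco[idx] = x
--             nums[i] = idx + 1
--     return nums
-- ===== SOURCE B (Python) =====
-- def LOCAEP(nums):
--     orig = list(nums)
--     dp = []
--     for x in orig:
--         best = 0
--         for v, d in zip(orig, dp):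
--             if v <= x and d > best:
--                 best = d
--         dp.append(best + 1)
--     nums[:] = dp
--     return nums
-- ===== Notes on version B (the rewrite author's own statement) =====
-- stated objective: simpler
-- what changed: Replaced A's patience-sort tail list with bisect insertion and in-place overwrites by a direct quadratic DP that computes, for each index, the length of the longest non-decreasing subsequence ending there as 1 + max dp over earlier elements <= current.
import Mathlib
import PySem

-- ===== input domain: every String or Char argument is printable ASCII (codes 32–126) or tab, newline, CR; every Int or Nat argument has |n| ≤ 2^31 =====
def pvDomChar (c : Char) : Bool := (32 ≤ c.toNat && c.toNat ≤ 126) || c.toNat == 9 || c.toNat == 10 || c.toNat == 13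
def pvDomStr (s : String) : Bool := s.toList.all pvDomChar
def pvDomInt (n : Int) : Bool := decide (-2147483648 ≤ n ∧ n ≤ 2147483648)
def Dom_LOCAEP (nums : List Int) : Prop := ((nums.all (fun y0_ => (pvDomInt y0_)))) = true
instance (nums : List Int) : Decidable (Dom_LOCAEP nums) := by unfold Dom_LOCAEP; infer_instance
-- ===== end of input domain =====

-- B replaces A's patience-sort/bisect tail maintenance with a direct quadratic DP for the
-- length of the longest non-decreasing subsequence ending at each index (objective: simpler).
-- Both Pythons overwrite `nums` in place identically; the equivalence proved is about the return value.

-- ===== PORT A =====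
-- insertion point (bisect.bisect / bisect_right); linear scan, exact on the sorted lists A passes it
def pvBisect (l : List Int) (x : Int) : Nat :=
  match l with
  | [] => 0
  | a :: t => if x < a then 0 else pvBisect t x + 1

def stepA (s : List Int × List Int) (x : Int) : List Int × List Int :=
  match s.1.getLast? with
  | none => (s.1 ++ [x], s.2 ++ [((s.1.length : Int) + 1)])
  | some r =>
    if r ≤ x then (s.1 ++ [x], s.2 ++ [((s.1.length : Int) + 1)])
    else
      let idx := pvBisect s.1 x
      (s.1.set idx x, s.2 ++ [((idx : Int) + 1)])

def LOCAEP (nums : List Int) : List Int := (nums.foldl stepA ([], [])).2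

-- ===== PORT B =====
-- inner loop of Source B: best dp value among earlier (value, dp) pairs whose value is ≤ x
def bestDP (acc : List (Int × Int)) (x : Int) : Int :=
  acc.foldl (fun b p => if p.1 ≤ x && b < p.2 then p.2 else b) 0

def stepB (acc : List (Int × Int)) (x : Int) : List (Int × Int) :=
  acc ++ [(x, bestDP acc x + 1)]

def LOCAEP_alt (nums : List Int) : List Int := (nums.foldl stepB []).map Prod.snd

-- ===== PRECONDITION & SPEC =====
def Spec_LOCAEP (nums : List Int) (out : List Int) : Prop := out = LOCAEP_alt nums
instance (nums : List Int) (out : List Int) : Decidable (Spec_LOCAEP nums out) := by unfold Spec_LOCAEP; infer_instance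

-- ===== CLAIM (what is proved, stated in full; the proofs are below) =====
def Claim_equal_LOCAEP : Prop := ∀ (nums : List Int), Dom_LOCAEP nums → Spec_LOCAEP nums (LOCAEP nums)

-- ===== LEMMAS AND PROOFS =====

-- number of elements ≤ x; for A's sorted `reco` this is the bisect_right insertion point
def cntLE (l : List Int) (x : Int) : Nat := (l.filter (fun a => decide (a ≤ x))).length

theorem cntLE_cons (a : Int) (t : List Int) (x : Int) :
    cntLE (a :: t) x = (if a ≤ x then 1 else 0) + cntLE t x := by
  simp only [cntLE, List.filter_cons]
  split_ifs with h <;> simp_all [Nat.add_comm]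

theorem cntLE_append (l : List Int) (y x : Int) :
    cntLE (l ++ [y]) x = cntLE l x + (if y ≤ x then 1 else 0) := by
  simp only [cntLE, List.filter_append, List.length_append, List.filter_cons, List.filter_nil]
  split_ifs with h <;> simp_all

theorem cntLE_zero_of_gt {a : Int} {t : List Int} {x : Int}
    (h : (a :: t).Pairwise (· ≤ ·)) (hx : x < a) : cntLE (a :: t) x = 0 := by
  simp only [cntLE, List.length_eq_zero_iff, List.filter_eq_nil_iff]
  intro b hb
  rcases List.mem_cons.mp hb with rfl | hb
  · simp; omega
  · have := (List.pairwise_cons.mp h).1 b hb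
    simp; omega

theorem cntLE_eq_length_of_all {l : List Int} {x : Int}
    (h : ∀ a ∈ l, a ≤ x) : cntLE l x = l.length := by
  simp only [cntLE]
  rw [List.filter_eq_self.mpr]
  intro a ha; simpa using h a ha

theorem le_last_of_sorted {l : List Int} {r : Int}
    (h : l.Pairwise (· ≤ ·)) (hl : l.getLast? = some r) : ∀ a ∈ l, a ≤ r := by
  induction l with
  | nil => simp at hl
  | cons a t ih =>
    cases t with
    | nil =>
      simp at hl; subst hl; simp
    | cons b u =>
      rw [List.getLast?_cons_cons] at hl
      have hpt := (List.pairwise_cons.mp h).2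
      have hr : r ∈ b :: u := by
        have := List.mem_of_getLast? (l := b :: u) hl
        exact this
      intro c hc
      rcases List.mem_cons.mp hc with rfl | hc
      · exact (List.pairwise_cons.mp h).1 r hr
      · exact ih hpt hl c hc

theorem pvBisect_eq_cntLE {l : List Int} (x : Int) (h : l.Pairwise (· ≤ ·)) :
    pvBisect l x = cntLE l x := by
  induction l with
  | nil => rfl
  | cons a t ih =>
    by_cases hx : x < a
    · simp [pvBisect, hx, cntLE_zero_of_gt h hx]
    · have ht := ih (List.pairwise_cons.mp h).2
      have ha : a ≤ x := not_lt.mp hx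
      rw [cntLE_cons]
      simp [pvBisect, hx, ha, ht]
      omega

theorem cntLE_lt_length {l : List Int} {r x : Int}
    (hl : l.getLast? = some r) (hr : ¬ r ≤ x) :
    cntLE l x < l.length := by
  have hmem : r ∈ l := List.mem_of_getLast? hl
  unfold cntLE
  rw [List.length_filter_lt_length_iff_exists]
  exact ⟨r, hmem, by simpa using hr⟩

theorem set_cnt (l : List Int) (x0 : Int) (h : l.Pairwise (· ≤ ·))
    (hlt : cntLE l x0 < l.length) :
    (l.set (cntLE l x0) x0).Pairwise (· ≤ ·) ∧
    ∀ x, cntLE (l.set (cntLE l x0) x0) x =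
      if x0 ≤ x then max (cntLE l x) (cntLE l x0 + 1) else cntLE l x := by
  induction l with
  | nil => simp at hlt
  | cons a t ih =>
    have hpt : t.Pairwise (· ≤ ·) := (List.pairwise_cons.mp h).2
    have hat : ∀ b ∈ t, a ≤ b := (List.pairwise_cons.mp h).1
    by_cases ha : a ≤ x0
    · have hc : cntLE (a :: t) x0 = cntLE t x0 + 1 := by rw [cntLE_cons]; simp [ha]; omega
      have hlt' : cntLE t x0 < t.length := by
        rw [hc] at hlt; simpa using hlt
      obtain ⟨ihs, ihc⟩ := ih hpt hlt'
      rw [hc]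
      have hset : (a :: t).set (cntLE t x0 + 1) x0 = a :: t.set (cntLE t x0) x0 := rfl
      rw [hset]
      constructor
      · rw [List.pairwise_cons]
        refine ⟨fun b hb => ?_, ihs⟩
        rcases List.mem_or_eq_of_mem_set hb with hb' | rfl
        · exact hat b hb'
        · exact ha
      · intro x
        rw [cntLE_cons, ihc x, cntLE_cons]
        by_cases hx : x0 ≤ x
        · have hax : a ≤ x := le_trans ha hx
          simp [hx, hax]; omega
        · simp [hx]
    · have ha' : x0 < a := not_le.mp ha
      have hc0 : cntLE (a :: t) x0 = 0 := cntLE_zero_of_gt h ha'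
      rw [hc0]
      have hset : (a :: t).set 0 x0 = x0 :: t := rfl
      rw [hset]
      constructor
      · rw [List.pairwise_cons]
        exact ⟨fun b hb => le_of_lt (lt_of_lt_of_le ha' (hat b hb)), hpt⟩
      · intro x
        by_cases hx : x0 ≤ x
        · by_cases hax : a ≤ x
          · rw [cntLE_cons, cntLE_cons]; simp [hx, hax]
          · have h0 : cntLE (a :: t) x = 0 := cntLE_zero_of_gt h (not_le.mp hax)
            have ht0 : cntLE t x = 0 := by
              have hcc := cntLE_cons a t x
              rw [h0] at hcc; omega
            rw [cntLE_cons, h0, ht0]; simp [hx]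
        · have hxa : ¬ a ≤ x := by omega
          rw [cntLE_cons, cntLE_cons]; simp [hx, hxa]

theorem bestDP_append (acc : List (Int × Int)) (p : Int × Int) (x : Int) :
    bestDP (acc ++ [p]) x = if p.1 ≤ x && bestDP acc x < p.2 then p.2 else bestDP acc x := by
  simp [bestDP, List.foldl_append]

theorem fold_eq (nums : List Int) :
    ∀ (reco out : List Int) (acc : List (Int × Int)),
    reco.Pairwise (· ≤ ·) → (∀ x, (cntLE reco x : Int) = bestDP acc x) →
    out = acc.map Prod.snd →
    (nums.foldl stepA (reco, out)).2 = (nums.foldl stepB acc).map Prod.snd := by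
  induction nums with
  | nil => intro reco out acc _ _ hout; simpa using hout
  | cons x0 ns ih =>
    intro reco out acc hs hinv hout
    have hkey : ∃ reco',
        stepA (reco, out) x0 = (reco', out ++ [((cntLE reco x0 : Int)) + 1]) ∧
        reco'.Pairwise (· ≤ ·) ∧
        ∀ x, (cntLE reco' x : Int) = bestDP (stepB acc x0) x := by
      have happ : ∀ _hall : (∀ b ∈ reco, b ≤ x0),
          (reco ++ [x0]).Pairwise (· ≤ ·) ∧
          ((reco.length : Int) + 1 = (cntLE reco x0 : Int) + 1) ∧
          ∀ x, (cntLE (reco ++ [x0]) x : Int) = bestDP (stepB acc x0) x := by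
        intro hall
        have hceq : cntLE reco x0 = reco.length := cntLE_eq_length_of_all hall
        refine ⟨?_, by rw [hceq], ?_⟩
        · rw [List.pairwise_append]
          exact ⟨hs, by simp, fun a ha b hb => by simp at hb; subst hb; exact hall a ha⟩
        · intro x
          rw [cntLE_append, stepB, bestDP_append, ← hinv x, ← hinv x0]
          by_cases hx : x0 ≤ x
          · have hx' : cntLE reco x = reco.length :=
              cntLE_eq_length_of_all (fun b hb => le_trans (hall b hb) hx)
            simp only [hx, if_true, decide_true, Bool.true_and]
            rw [hx', hceq]
            simp only [decide_eq_true_eq]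
            push_cast
            split_ifs <;> omega
          · simp [hx]
      rcases hl : reco.getLast? with _ | r
      · refine ⟨reco ++ [x0], ?_⟩
        have hall : ∀ b ∈ reco, b ≤ x0 := by
          rw [List.getLast?_eq_none_iff] at hl; simp [hl]
        obtain ⟨h1, h2, h3⟩ := happ hall
        exact ⟨by simp [stepA, hl, h2], h1, h3⟩
      · by_cases hr : r ≤ x0
        · refine ⟨reco ++ [x0], ?_⟩
          have hall : ∀ b ∈ reco, b ≤ x0 :=
            fun b hb => le_trans (le_last_of_sorted hs hl b hb) hr
          obtain ⟨h1, h2, h3⟩ := happ hall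
          exact ⟨by simp [stepA, hl, hr, h2], h1, h3⟩
        · have hlt := cntLE_lt_length hl hr
          have hbi : pvBisect reco x0 = cntLE reco x0 := pvBisect_eq_cntLE x0 hs
          obtain ⟨hset_s, hset_c⟩ := set_cnt reco x0 hs hlt
          refine ⟨reco.set (cntLE reco x0) x0, ?_, hset_s, ?_⟩
          · simp [stepA, hl, hr, hbi]
          · intro x
            rw [hset_c x, stepB, bestDP_append, ← hinv x, ← hinv x0]
            by_cases hx : x0 ≤ x
            · simp only [hx, if_true, decide_true, Bool.true_and]
              simp only [decide_eq_true_eq]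
              push_cast
              split_ifs <;> omega
            · simp [hx]
    obtain ⟨reco', hstep, hs', hinv'⟩ := hkey
    have hout' : out ++ [(cntLE reco x0 : Int) + 1] = (stepB acc x0).map Prod.snd := by
      simp [stepB, hout, ← hinv x0]
    simp only [List.foldl_cons]
    rw [hstep]
    exact ih reco' _ (stepB acc x0) hs' hinv' hout'

-- ===== VERDICT (by name: the statement is the Claim_ definition above) =====
theorem LOCAEP_spec : Claim_equal_LOCAEP := by
  intro nums _
  unfold Spec_LOCAEP LOCAEP LOCAEP_alt
  exact fold_eq nums [] [] [] (by simp) (fun x => by simp [cntLE, bestDP]) rfl
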